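-- pv_equiv track=rewrite | github.com/AnnelyseBe/adventofcode | 2024/day09/solutions.py | find_index_first_x
-- ===== SOURCE A (Python) =====
-- def find_index_first_x(disk_layout, to_search, repetitioncount):
--
--     i = 0
--     while (i < len(disk_layout)):
--         still_ok = True
--         for j in range(repetitioncount):
--             if (i+j >= len(disk_layout) or disk_layout[i+j] != to_search):
--                 still_ok = False
--                 break
--         if (still_ok): # position found
--             return i
--         else:
--             i = i + j + 1
--
--     return -1
-- ===== SOURCE B (Python) =====
-- def find_index_first_x(disk_layout, to_search, repetitioncount):
--     # A run of length <= 0 is found immediately at index 0 of any non-empty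
--     # layout; an empty layout has no positions at all.
--     if repetitioncount <= 0:
--         return 0 if disk_layout else -1
--     run = 0
--     for i, v in enumerate(disk_layout):
--         run = run + 1 if v == to_search else 0
--         if run == repetitioncount:
--             return i - repetitioncount + 1
--     return -1
-- ===== Notes on version B (the rewrite author's own statement) =====
-- stated objective: idiomatic
-- what changed: Replaces A's window-check-with-skip (while loop re-probing a j-window at each candidate start via an inner range loop and indexing) by a single forward enumerate scan that maintains a running consecutive-match counter (no inner loop, no indexing) and returns i - repetitioncount + 1 when the counter reaches repetitioncount; non-positive repetition counts are answered directly (0 for a non-empty layout, -1 for an empty one).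
import Mathlib
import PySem

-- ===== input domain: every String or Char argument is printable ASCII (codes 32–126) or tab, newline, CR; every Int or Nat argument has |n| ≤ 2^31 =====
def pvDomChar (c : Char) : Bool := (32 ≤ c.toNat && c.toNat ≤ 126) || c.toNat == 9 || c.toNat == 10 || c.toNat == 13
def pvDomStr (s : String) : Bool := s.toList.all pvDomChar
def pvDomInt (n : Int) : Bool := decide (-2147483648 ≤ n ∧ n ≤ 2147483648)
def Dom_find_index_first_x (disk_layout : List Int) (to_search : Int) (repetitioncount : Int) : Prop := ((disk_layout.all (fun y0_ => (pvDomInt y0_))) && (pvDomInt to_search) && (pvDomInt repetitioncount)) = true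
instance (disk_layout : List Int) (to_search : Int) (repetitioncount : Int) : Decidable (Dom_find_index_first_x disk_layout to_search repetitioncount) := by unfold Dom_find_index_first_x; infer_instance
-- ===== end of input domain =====

-- B replaces A's window-check-with-skip by a single scan maintaining a running
-- consecutive-match counter (objective: more idiomatic, same O(n) cost).

-- ===== PORT A =====
-- the inner 'for j in range(repetitioncount)' loop: none = completed with still_ok True,
-- some j = broke with still_ok False at offset j (Python's j after the break)
def find_index_first_x_inner (disk_layout : List Int) (to_search : Int) (i : Int) : List Int → Option Int
  | [] => none
  | j :: js =>
    if i + j ≥ (disk_layout.length : Int) ∨ ¬ (PySem.List.pyGet? disk_layout (i + j) = some to_search) then some j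
    else find_index_first_x_inner disk_layout to_search i js

-- the outer while loop; fuel only makes the recursion structural: i grows by at
-- least 1 per iteration, so fuel length+1 is never exhausted
def find_index_first_x_outer (disk_layout : List Int) (to_search : Int) (repetitioncount : Int) : Int → Nat → Int
  | _, 0 => -1
  | i, fuel + 1 =>
    if i < (disk_layout.length : Int) then
      match find_index_first_x_inner disk_layout to_search i (PySem.List.pyRange 0 repetitioncount 1) with
      | none => i
      | some j => find_index_first_x_outer disk_layout to_search repetitioncount (i + j + 1) fuel
    else -1

def find_index_first_x (disk_layout : List Int) (to_search : Int) (repetitioncount : Int) : Int :=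
  find_index_first_x_outer disk_layout to_search repetitioncount 0 (disk_layout.length + 1)

-- ===== PORT B =====
-- the 'for i, v in enumerate(disk_layout)' loop of Source B, carrying the index i and the run counter
def find_index_first_x_scan (to_search : Int) (repetitioncount : Int) : List Int → Int → Int → Int
  | [], _, _ => -1
  | v :: rest, i, run =>
    let run' := if v = to_search then run + 1 else 0
    if run' = repetitioncount then i - repetitioncount + 1
    else find_index_first_x_scan to_search repetitioncount rest (i + 1) run'

def find_index_first_x_alt (disk_layout : List Int) (to_search : Int) (repetitioncount : Int) : Int :=
  if repetitioncount ≤ 0 then (if disk_layout = [] then -1 else 0)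
  else find_index_first_x_scan to_search repetitioncount disk_layout 0 0

-- ===== PRECONDITION & SPEC =====
def Spec_find_index_first_x (disk_layout : List Int) (to_search : Int) (repetitioncount : Int) (out : Int) : Prop := out = find_index_first_x_alt disk_layout to_search repetitioncount
instance (disk_layout : List Int) (to_search : Int) (repetitioncount : Int) (out : Int) : Decidable (Spec_find_index_first_x disk_layout to_search repetitioncount out) := by unfold Spec_find_index_first_x; infer_instance

-- ===== CLAIM (what is proved, stated in full; the proofs are below) =====
def Claim_equal_find_index_first_x : Prop := ∀ (disk_layout : List Int) (to_search : Int) (repetitioncount : Int), Dom_find_index_first_x disk_layout to_search repetitioncount → Spec_find_index_first_x disk_layout to_search repetitioncount (find_index_first_x disk_layout to_search repetitioncount)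

-- ===== LEMMAS AND PROOFS =====

-- a window of k copies of ts starts at position s
abbrev pvWinOk (disk : List Int) (ts : Int) (k : Nat) (s : Nat) : Prop :=
  s + k ≤ disk.length ∧ ∀ t, t < k → disk[s + t]? = some ts

-- reference function: first s' ≥ s with a window, else -1
def pvRef (disk : List Int) (ts : Int) (k : Nat) (s : Nat) : Int :=
  if s < disk.length then
    (if pvWinOk disk ts k s then (s : Int) else pvRef disk ts k (s + 1))
  else -1
termination_by disk.length - s

lemma pvRef_of_ge (disk : List Int) (ts : Int) (k s : Nat) (h : disk.length ≤ s) :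
    pvRef disk ts k s = -1 := by
  rw [pvRef]; simp [Nat.not_lt.mpr h]

lemma pvRef_succ_of_not (disk : List Int) (ts : Int) (k s : Nat) (h : ¬ pvWinOk disk ts k s) :
    pvRef disk ts k s = pvRef disk ts k (s + 1) := by
  by_cases hs : s < disk.length
  · rw [pvRef]; simp [hs, h]
  · rw [pvRef_of_ge _ _ _ _ (Nat.not_lt.mp hs), pvRef_of_ge _ _ _ _ (by omega)]

lemma pvRef_skip (disk : List Int) (ts : Int) (k : Nat) :
    ∀ (d s : Nat), (∀ u, s ≤ u → u < s + d → ¬ pvWinOk disk ts k u) →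
    pvRef disk ts k s = pvRef disk ts k (s + d) := by
  intro d
  induction d with
  | zero => intro s _; rfl
  | succ d ih =>
    intro s h
    rw [pvRef_succ_of_not _ _ _ _ (h s le_rfl (by omega))]
    rw [ih (s + 1) (fun u hu1 hu2 => h u (by omega) (by omega))]
    congr 1; omega

lemma pvRef_stop (disk : List Int) (ts : Int) (k s : Nat)
    (h : ∀ u, s ≤ u → ¬ pvWinOk disk ts k u) : pvRef disk ts k s = -1 := by
  have h2 : pvRef disk ts k s = pvRef disk ts k (s + (disk.length - s)) :=
    pvRef_skip disk ts k _ s (fun u hu _ => h u hu)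
  rw [h2, pvRef_of_ge _ _ _ _ (by omega)]

-- ---- A side ----

lemma pv_inner_none (disk : List Int) (ts : Int) (rep i : Int) (hi : 0 ≤ i) :
    ∀ (a : Int), 0 ≤ a →
    (find_index_first_x_inner disk ts i (PySem.List.pyRange a rep 1) = none ↔
      ∀ j, a ≤ j → j < rep → i + j < (disk.length : Int) ∧ PySem.List.pyGet? disk (i + j) = some ts) := by
  intro a
  induction h : (rep - a).toNat generalizing a with
  | zero =>
    intro ha
    rw [PySem.List.pyRange_one_eq_nil (by omega)]
    simp only [find_index_first_x_inner]
    constructor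
    · intro _ j hj1 hj2; omega
    · intro _; trivial
  | succ m ih =>
    intro ha
    rw [PySem.List.pyRange_one_cons (by omega)]
    simp only [find_index_first_x_inner]
    by_cases hc : i + a ≥ (disk.length : Int) ∨ ¬ (PySem.List.pyGet? disk (i + a) = some ts)
    · simp only [if_pos hc]
      constructor
      · intro hcontra; exact absurd hcontra (by simp)
      · intro hall
        have := hall a le_rfl (by omega)
        exact absurd hc (by push_neg; exact ⟨by omega, this.2⟩)
    · simp only [if_neg hc]
      push_neg at hc
      rw [ih (a + 1) (by omega) (by omega)]
      constructor
      · intro hall j hj1 hj2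
        rcases eq_or_lt_of_le hj1 with rfl | hlt
        · exact ⟨by omega, hc.2⟩
        · exact hall j (by omega) hj2
      · intro hall j hj1 hj2; exact hall j (by omega) hj2

lemma pv_inner_some (disk : List Int) (ts : Int) (rep i j : Int) (hi : 0 ≤ i) :
    ∀ (a : Int), 0 ≤ a →
    find_index_first_x_inner disk ts i (PySem.List.pyRange a rep 1) = some j →
    a ≤ j ∧ j < rep ∧
      (i + j ≥ (disk.length : Int) ∨ ¬ (PySem.List.pyGet? disk (i + j) = some ts)) ∧
      (∀ j', a ≤ j' → j' < j → i + j' < (disk.length : Int) ∧ PySem.List.pyGet? disk (i + j') = some ts) := by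
  intro a
  induction h : (rep - a).toNat generalizing a with
  | zero =>
    intro ha hsome
    rw [PySem.List.pyRange_one_eq_nil (by omega)] at hsome
    exact absurd hsome (by simp [find_index_first_x_inner])
  | succ m ih =>
    intro ha hsome
    rw [PySem.List.pyRange_one_cons (by omega)] at hsome
    simp only [find_index_first_x_inner] at hsome
    by_cases hc : i + a ≥ (disk.length : Int) ∨ ¬ (PySem.List.pyGet? disk (i + a) = some ts)
    · rw [if_pos hc] at hsome
      obtain rfl : a = j := by injection hsome
      exact ⟨le_rfl, by omega, hc, fun j' h1 h2 => by omega⟩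
    · rw [if_neg hc] at hsome
      push_neg at hc
      obtain ⟨h1, h2, h3, h4⟩ := ih (a + 1) (by omega) (by omega) hsome
      refine ⟨by omega, h2, h3, fun j' hj1 hj2 => ?_⟩
      rcases eq_or_lt_of_le hj1 with rfl | hlt
      · exact ⟨hc.1, hc.2⟩
      · exact h4 j' (by omega) hj2

lemma pv_outer_eq_ref (disk : List Int) (ts rep : Int) (hrep : 1 ≤ rep) :
    ∀ (fuel : Nat) (i : Int), 0 ≤ i → (disk.length : Int) - i < fuel →
    find_index_first_x_outer disk ts rep i fuel = pvRef disk ts rep.toNat i.toNat := by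
  intro fuel
  induction fuel with
  | zero => intro i hi hf; rw [pvRef_of_ge _ _ _ _ (by omega)]; rfl
  | succ fuel ih =>
    intro i hi hf
    by_cases hlt : i < (disk.length : Int)
    · cases hinner : find_index_first_x_inner disk ts i (PySem.List.pyRange 0 rep 1) with
      | none =>
        simp only [find_index_first_x_outer, if_pos hlt, hinner]
        have hall := (pv_inner_none disk ts rep i hi 0 le_rfl).mp hinner
        have hwin : pvWinOk disk ts rep.toNat i.toNat := by
          constructor
          · have := hall (rep - 1) (by omega) (by omega)
            omega
          · intro t ht
            have := hall (t : Int) (by omega) (by omega)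
            have h2 := this.2
            rw [PySem.List.pyGet?_of_nonneg disk (by omega)] at h2
            have : (i + (t : Int)).toNat = i.toNat + t := by omega
            rwa [this] at h2
        rw [pvRef]
        rw [if_pos (by omega), if_pos hwin]
        omega
      | some j =>
        simp only [find_index_first_x_outer, if_pos hlt, hinner]
        obtain ⟨hj0, hjrep, hbad, hgood⟩ := pv_inner_some disk ts rep i j hi 0 le_rfl hinner
        rw [ih (i + j + 1) (by omega) (by omega)]
        have hskip : ∀ u, i.toNat ≤ u → u < i.toNat + ((i + j + 1).toNat - i.toNat) → ¬ pvWinOk disk ts rep.toNat u := by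
          intro u hu1 hu2 hwin
          obtain ⟨hwl, hwa⟩ := hwin
          rcases hbad with hge | hne
          · omega
          · have hlen : i + j < (disk.length : Int) := by omega
            have ht : (i + j).toNat - u < rep.toNat := by omega
            have := hwa ((i + j).toNat - u) ht
            have heq : u + ((i + j).toNat - u) = (i + j).toNat := by omega
            rw [heq] at this
            rw [PySem.List.pyGet?_of_nonneg disk (by omega)] at hne
            exact hne this
        have := pvRef_skip disk ts rep.toNat ((i + j + 1).toNat - i.toNat) i.toNat hskip
        rw [this]
        congr 1
        omega
    · simp only [find_index_first_x_outer, if_neg hlt]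
      rw [pvRef_of_ge _ _ _ _ (by omega)]

-- ---- B side ----

lemma pv_scan_eq_ref (disk : List Int) (ts rep : Int) (hrep : 1 ≤ rep) :
    ∀ (l : List Int) (s : Nat) (r : Int), l = disk.drop s → s ≤ disk.length →
    0 ≤ r → r.toNat ≤ s → r < rep →
    (∀ t, s - r.toNat ≤ t → t < s → disk[t]? = some ts) →
    find_index_first_x_scan ts rep l (s : Int) r = pvRef disk ts rep.toNat (s - r.toNat) := by
  intro l
  induction l with
  | nil =>
    intro s r hdrop hs hr0 hrs hrrep hwin
    have hsn : disk.length ≤ s := List.drop_eq_nil_iff.mp hdrop.symm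
    rw [pvRef_stop]
    · rfl
    · intro u hu ⟨hul, _⟩; omega
  | cons v rest ih =>
    intro s r hdrop hs hr0 hrs hrrep hwin
    have hget : disk[s]? = some v := by
      have : (disk.drop s)[0]? = some v := by rw [← hdrop]; rfl
      rwa [List.getElem?_drop, Nat.add_zero] at this
    have hslt : s < disk.length := (List.getElem?_eq_some_iff.mp hget).1
    have hrest : rest = disk.drop (s + 1) := by
      have : (disk.drop s).drop 1 = disk.drop (s + 1) := by rw [List.drop_drop]
      rw [← this, ← hdrop]; rfl
    simp only [find_index_first_x_scan]
    by_cases hv : v = ts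
    · simp only [if_pos hv]
      by_cases hdone : r + 1 = rep
      · simp only [if_pos hdone]
        have hrn : r.toNat = rep.toNat - 1 := by omega
        have hwinok : pvWinOk disk ts rep.toNat (s - r.toNat) := by
          constructor
          · omega
          · intro t ht
            rcases Nat.lt_or_ge t (rep.toNat - 1) with h | h
            · exact hwin (s - r.toNat + t) (by omega) (by omega)
            · have : s - r.toNat + t = s := by omega
              rw [this, hget, hv]
        rw [pvRef, if_pos (by omega), if_pos hwinok]
        omega
      · simp only [if_neg hdone]
        have := ih (s + 1) (r + 1) hrest (by omega) (by omega) (by omega) (by omega)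
          (by
            intro t ht1 ht2
            rcases Nat.lt_or_ge t s with h | h
            · exact hwin t (by omega) h
            · have : t = s := by omega
              rw [this, hget, hv])
        have hcast : ((s : Int) + 1) = ((s + 1 : Nat) : Int) := by push_cast; ring
        rw [hcast, this]
        congr 1
        omega
    · simp only [if_neg hv, if_neg (by omega : ¬ (0 : Int) = rep)]
      have := ih (s + 1) 0 hrest (by omega) le_rfl (by omega) (by omega)
        (by intro t ht1 ht2; omega)
      have hcast : ((s : Int) + 1) = ((s + 1 : Nat) : Int) := by push_cast; ring
      rw [hcast, this]
      simp only [Int.toNat_zero, Nat.sub_zero]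
      have hskip : ∀ u, s - r.toNat ≤ u → u < s - r.toNat + (s + 1 - (s - r.toNat)) → ¬ pvWinOk disk ts rep.toNat u := by
        intro u hu1 hu2 ⟨hwl, hwa⟩
        have ht : s - u < rep.toNat := by omega
        have := hwa (s - u) ht
        have heq : u + (s - u) = s := by omega
        rw [heq, hget] at this
        exact hv (by injection this)
      have := pvRef_skip disk ts rep.toNat (s + 1 - (s - r.toNat)) (s - r.toNat) hskip
      rw [this]
      congr 1
      omega

-- ===== VERDICT (by name: the statement is the Claim_ definition above) =====
theorem find_index_first_x_spec : Claim_equal_find_index_first_x := by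
  intro disk ts rep _dom
  unfold Spec_find_index_first_x find_index_first_x find_index_first_x_alt
  by_cases hrep : rep ≤ 0
  · rw [if_pos hrep]
    cases disk with
    | nil => rfl
    | cons x xs =>
      rw [show find_index_first_x_outer (x :: xs) ts rep 0 ((x :: xs).length + 1)
            = if (0 : Int) < ((x :: xs).length : Int) then
                (match find_index_first_x_inner (x :: xs) ts 0 (PySem.List.pyRange 0 rep 1) with
                 | none => (0 : Int)
                 | some j => find_index_first_x_outer (x :: xs) ts rep (0 + j + 1) ((x :: xs).length)) else -1
          from rfl]
      rw [PySem.List.pyRange_one_eq_nil (by omega)]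
      simp [find_index_first_x_inner]
  · rw [if_neg hrep]
    push_neg at hrep
    have hA := pv_outer_eq_ref disk ts rep (by omega) (disk.length + 1) 0 le_rfl (by push_cast; omega)
    have hB := pv_scan_eq_ref disk ts rep (by omega) disk 0 0 rfl (by omega) le_rfl le_rfl (by omega)
      (by intro t ht1 ht2; omega)
    simp only [Int.toNat_zero, Nat.sub_zero] at hA hB
    rw [hA]
    rw [← hB]
    rfl
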